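-- pv_equiv track=rewrite | github.com/hhqx/leetcode | editor-old1029/220924力扣秋赛/1.py | temperatureTrend
-- ===== SOURCE A (Python) =====
-- from typing import List
--
-- def temperatureTrend(temperatureA: List[int], temperatureB: List[int]) -> int:
--     def getTrend(d1, d2):
--         if d1 > d2:
--             return 0
--         elif d1 == d2:
--             return 1
--         elif d1 < d2:
--             return 2
--
--     ans = 0
--     start = -1
--     for i in range(len(temperatureA)-1):
--         if getTrend(temperatureA[i], temperatureA[i+1]) == getTrend(temperatureB[i], temperatureB[i+1]):
--             ans = max(ans, i-start)
--         else:
--             start = i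
--
--     return ans
-- ===== SOURCE B (Python) =====
-- def temperatureTrend(temperatureA, temperatureB):
--     n = len(temperatureA)
--
--     def sign(a, b):
--         return (a > b) - (a < b)
--
--     # break positions: steps whose trend differs, with sentinels -1 and n-1
--     breaks = [-1] + [i for i in range(n - 1)
--                      if sign(temperatureA[i], temperatureA[i + 1])
--                      != sign(temperatureB[i], temperatureB[i + 1])] + [n - 1]
--     # the answer is the widest gap between consecutive breaks
--     return max(0, max(y - x - 1 for x, y in zip(breaks, breaks[1:])))
-- ===== Notes on version B (the rewrite author's own statement) =====
-- stated objective: alternative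
-- what changed: Instead of A's running milestone loop (ans = max(ans, i-start) with a remembered last-mismatch index), B collects the list of break positions (steps where the trend signs differ, plus sentinels) and returns the widest gap between consecutive breaks.
import Mathlib
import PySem

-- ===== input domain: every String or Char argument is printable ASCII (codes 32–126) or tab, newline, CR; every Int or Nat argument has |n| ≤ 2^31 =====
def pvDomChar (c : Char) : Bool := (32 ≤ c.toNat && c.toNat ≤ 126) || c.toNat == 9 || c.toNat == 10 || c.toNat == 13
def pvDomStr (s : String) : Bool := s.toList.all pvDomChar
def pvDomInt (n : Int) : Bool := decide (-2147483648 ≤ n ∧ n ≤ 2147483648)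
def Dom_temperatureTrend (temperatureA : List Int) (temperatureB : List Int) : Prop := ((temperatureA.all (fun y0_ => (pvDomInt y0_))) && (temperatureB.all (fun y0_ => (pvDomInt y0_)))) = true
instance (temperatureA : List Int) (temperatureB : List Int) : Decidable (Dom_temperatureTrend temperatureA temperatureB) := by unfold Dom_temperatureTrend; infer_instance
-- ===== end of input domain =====

-- B replaces A's running milestone loop (ans = max(ans, i - start) with a remembered last-mismatch index)
-- by an explicit list of break positions (mismatching steps plus sentinels) whose widest consecutive gap
-- is the answer; equivalence of the return values is proved on Pre_ (exactly where A does not raise).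

-- ===== PORT A =====
-- getTrend of A (the dead fall-through after the elif chain is unreachable for ints)
def getTrendA (d1 d2 : Int) : Int :=
  if d1 > d2 then 0 else if d1 = d2 then 1 else 2

def temperatureTrend (temperatureA : List Int) (temperatureB : List Int) : Int :=
  -- for i in range(len(temperatureA)-1): indexing is total under Pre_; .getD 0 stands for the raising access
  ((PySem.List.pyRange 0 ((temperatureA.length : Int) - 1) 1).foldl
    (fun (st : Int × Int) i =>
      if getTrendA ((PySem.List.pyGet? temperatureA i).getD 0) ((PySem.List.pyGet? temperatureA (i+1)).getD 0)
         = getTrendA ((PySem.List.pyGet? temperatureB i).getD 0) ((PySem.List.pyGet? temperatureB (i+1)).getD 0)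
      then (max st.1 (i - st.2), st.2)
      else (st.1, i))
    (0, -1)).1

-- ===== PORT B =====
-- (a > b) - (a < b), Python booleans as ints
def signB (x y : Int) : Int :=
  (if x > y then (1:Int) else 0) - (if x < y then (1:Int) else 0)

def temperatureTrend_alt (temperatureA : List Int) (temperatureB : List Int) : Int :=
  let n : Int := temperatureA.length
  -- breaks = [-1] + [i for i in range(n-1) if sign(A[i],A[i+1]) != sign(B[i],B[i+1])] + [n-1]
  let breaks : List Int :=
    [-1] ++ ((PySem.List.pyRange 0 (n - 1) 1).filter (fun i =>
      ! decide (signB ((PySem.List.pyGet? temperatureA i).getD 0) ((PySem.List.pyGet? temperatureA (i+1)).getD 0)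
              = signB ((PySem.List.pyGet? temperatureB i).getD 0) ((PySem.List.pyGet? temperatureB (i+1)).getD 0)))) ++ [n - 1]
  -- max(0, max(y - x - 1 for x, y in zip(breaks, breaks[1:])))  (the generator is never empty: breaks has ≥ 2 elements)
  let spans := (breaks.zip breaks.tail).map (fun p => p.2 - p.1 - 1)
  max 0 ((PySem.List.max? spans (fun x => x)).getD 0)

-- ===== PRECONDITION & SPEC =====
-- Pre_ excludes exactly the inputs where A raises IndexError (temperatureB shorter than temperatureA with ≥ 2 elements)
def Pre_temperatureTrend (temperatureA : List Int) (temperatureB : List Int) : Prop :=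
  temperatureA.length ≤ 1 ∨ temperatureA.length ≤ temperatureB.length
instance (temperatureA : List Int) (temperatureB : List Int) : Decidable (Pre_temperatureTrend temperatureA temperatureB) := by unfold Pre_temperatureTrend; infer_instance

def pvWitness_temperatureTrend : List Int × List Int := ([1, 2, 1, 1], [3, 2, 2, 5])

def Spec_temperatureTrend (temperatureA : List Int) (temperatureB : List Int) (out : Int) : Prop := out = temperatureTrend_alt temperatureA temperatureB
instance (temperatureA : List Int) (temperatureB : List Int) (out : Int) : Decidable (Spec_temperatureTrend temperatureA temperatureB out) := by unfold Spec_temperatureTrend; infer_instance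

-- ===== CLAIM (what is proved, stated in full; the proofs are below) =====
def Claim_equal_temperatureTrend : Prop := ∀ (temperatureA : List Int) (temperatureB : List Int), Dom_temperatureTrend temperatureA temperatureB → Pre_temperatureTrend temperatureA temperatureB → Spec_temperatureTrend temperatureA temperatureB (temperatureTrend temperatureA temperatureB)

-- ===== LEMMAS AND PROOFS =====

-- widest gap between consecutive elements of (prev :: l), clamped at 0
def gmAux (prev : Int) : List Int → Int
  | [] => 0
  | y :: rest => max (y - prev - 1) (gmAux y rest)

lemma gmAux_nonneg (prev : Int) (l : List Int) : 0 ≤ gmAux prev l := by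
  induction l generalizing prev with
  | nil => simp [gmAux]
  | cons y rest ih => simp only [gmAux]; exact le_max_of_le_right (ih y)

-- B's zip/max computation is gmAux
lemma spans_cons (prev y : Int) (rest : List Int) :
    ((prev :: y :: rest).zip (prev :: y :: rest).tail).map (fun p => p.2 - p.1 - 1)
    = (y - prev - 1) :: (((y :: rest).zip (y :: rest).tail).map (fun p => p.2 - p.1 - 1)) := by
  simp [List.zip]

lemma foldl_spans (l : List Int) : ∀ (y d : Int),
    max 0 ((((y :: l).zip (y :: l).tail).map (fun p => p.2 - p.1 - 1)).foldl max d)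
    = max (max 0 d) (gmAux y l) := by
  induction l with
  | nil => intro y d; simp [gmAux]
  | cons z r ih =>
    intro y d
    rw [spans_cons, List.foldl_cons, ih z (max d (z - y - 1))]
    simp only [gmAux]
    omega

lemma bridge (prev : Int) (l : List Int) :
    max 0 ((PySem.List.max? (((prev :: l).zip (prev :: l).tail).map (fun p => p.2 - p.1 - 1)) (fun x => x)).getD 0)
    = gmAux prev l := by
  cases l with
  | nil => simp [gmAux, PySem.List.max?]
  | cons y rest =>
    rw [spans_cons, PySem.List.max?_id_cons]
    rw [show ∀ d t, ((some ((t : List Int).foldl max d)).getD 0) = t.foldl max d by intro d t; rfl]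
    rw [foldl_spans rest y (y - prev - 1)]
    simp only [gmAux]
    have := gmAux_nonneg y rest
    omega

-- the first gap out of x is at least c - x - 1 when all later breaks are ≥ c
lemma gm_head_ge (x c b : Int) (l : List Int) (hl : ∀ y ∈ l, c ≤ y) (hb : c ≤ b) :
    c - x - 1 ≤ gmAux x (l ++ [b]) := by
  cases l with
  | nil => simp only [List.nil_append, gmAux]; have := gmAux_nonneg b ([] : List Int); omega
  | cons y rest =>
    have hy : c ≤ y := hl y (List.mem_cons_self)
    simp only [List.cons_append, gmAux]
    have := gmAux_nonneg y (rest ++ [b])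
    omega

-- the two step-match tests agree
lemma match_eq (a1 a2 b1 b2 : Int) :
    (getTrendA a1 a2 = getTrendA b1 b2) ↔ (signB a1 a2 = signB b1 b2) := by
  unfold getTrendA signB
  split_ifs <;> omega

-- core invariant: A's fold over pyRange a b from (ans, start) computes max ans of the widest gap in
-- (start :: breaks-in-[a,b) :: b), given that ans already covers the run ending at a and is nonnegative.
lemma loop_eq (tA tB : List Int) : ∀ (fuel : Nat) (a b ans start : Int),
    b - a ≤ fuel → a ≤ b → start ≤ a - 1 → 0 ≤ ans → a - 1 - start ≤ ans →
    ((PySem.List.pyRange a b 1).foldl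
      (fun (st : Int × Int) i =>
        if getTrendA ((PySem.List.pyGet? tA i).getD 0) ((PySem.List.pyGet? tA (i+1)).getD 0)
           = getTrendA ((PySem.List.pyGet? tB i).getD 0) ((PySem.List.pyGet? tB (i+1)).getD 0)
        then (max st.1 (i - st.2), st.2)
        else (st.1, i))
      (ans, start)).1
    =
    max ans (gmAux start
      (((PySem.List.pyRange a b 1).filter (fun i =>
        ! decide (signB ((PySem.List.pyGet? tA i).getD 0) ((PySem.List.pyGet? tA (i+1)).getD 0)
                = signB ((PySem.List.pyGet? tB i).getD 0) ((PySem.List.pyGet? tB (i+1)).getD 0)))) ++ [b])) := by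
  intro fuel
  induction fuel with
  | zero =>
    intro a b ans start hb hab hstart hans hrun
    have heq : a = b := by omega
    rw [PySem.List.pyRange_one_eq_nil (by omega)]
    simp only [List.foldl_nil, List.filter_nil, List.nil_append, gmAux]
    omega
  | succ k ih =>
    intro a b ans start hb hab hstart hans hrun
    by_cases hlt : a < b
    · rw [PySem.List.pyRange_one_cons hlt]
      simp only [List.foldl_cons]
      by_cases hm : getTrendA ((PySem.List.pyGet? tA a).getD 0) ((PySem.List.pyGet? tA (a+1)).getD 0)
           = getTrendA ((PySem.List.pyGet? tB a).getD 0) ((PySem.List.pyGet? tB (a+1)).getD 0)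
      · have hm' := (match_eq _ _ _ _).mp hm
        rw [if_pos hm]
        rw [List.filter_cons_of_neg (by simp [hm'])]
        rw [ih (a+1) b (max ans (a - start)) start (by omega) (by omega) (by omega) (by omega) (by omega)]
        -- a - start ≤ the gap out of start, since every later break is ≥ a+1
        have hge : a + 1 - start - 1 ≤ gmAux start
            (((PySem.List.pyRange (a+1) b 1).filter (fun i =>
              ! decide (signB ((PySem.List.pyGet? tA i).getD 0) ((PySem.List.pyGet? tA (i+1)).getD 0)
                      = signB ((PySem.List.pyGet? tB i).getD 0) ((PySem.List.pyGet? tB (i+1)).getD 0)))) ++ [b]) := by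
          apply gm_head_ge
          · intro y hy
            have := (PySem.List.mem_pyRange_one.mp (List.mem_of_mem_filter hy)).1
            omega
          · omega
        omega
      · have hm' : ¬ signB ((PySem.List.pyGet? tA a).getD 0) ((PySem.List.pyGet? tA (a+1)).getD 0)
           = signB ((PySem.List.pyGet? tB a).getD 0) ((PySem.List.pyGet? tB (a+1)).getD 0) :=
          fun h => hm ((match_eq _ _ _ _).mpr h)
        rw [if_neg hm]
        rw [List.filter_cons_of_pos (by simp [hm']), List.cons_append]
        rw [ih (a+1) b ans a (by omega) (by omega) (by omega) (by omega) (by omega)]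
        simp only [gmAux]
        omega
    · have heq : a = b := by omega
      rw [PySem.List.pyRange_one_eq_nil (by omega)]
      simp only [List.foldl_nil, List.filter_nil, List.nil_append, gmAux]
      omega

-- ===== VERDICT (by name: the statement is the Claim_ definition above) =====
theorem temperatureTrend_spec : Claim_equal_temperatureTrend := by
  intro tA tB _ _
  unfold Spec_temperatureTrend temperatureTrend temperatureTrend_alt
  simp only [List.cons_append, List.nil_append]
  rw [bridge (-1) (((PySem.List.pyRange 0 ((tA.length : Int) - 1) 1).filter (fun i =>
      ! decide (signB ((PySem.List.pyGet? tA i).getD 0) ((PySem.List.pyGet? tA (i+1)).getD 0)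
              = signB ((PySem.List.pyGet? tB i).getD 0) ((PySem.List.pyGet? tB (i+1)).getD 0)))) ++ [(tA.length : Int) - 1])]
  by_cases hn : (tA.length : Int) - 1 < 0
  · rw [PySem.List.pyRange_one_eq_nil (by omega)]
    have h0 : tA.length = 0 := by omega
    simp [h0, List.filter_nil, gmAux]
  · have h := loop_eq tA tB ((tA.length : Int) - 1).toNat 0 ((tA.length : Int) - 1) 0 (-1)
      (by omega) (by omega) (by omega) (by omega) (by omega)
    rw [h]
    have := gmAux_nonneg (-1)
      (((PySem.List.pyRange 0 ((tA.length : Int) - 1) 1).filter (fun i =>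
        ! decide (signB ((PySem.List.pyGet? tA i).getD 0) ((PySem.List.pyGet? tA (i+1)).getD 0)
                = signB ((PySem.List.pyGet? tB i).getD 0) ((PySem.List.pyGet? tB (i+1)).getD 0)))) ++ [(tA.length : Int) - 1])
    omega
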